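-- pv_equiv track=rewrite | github.com/HITOfficial/College | WDI/lekcja 3 21.10.2020/zad10.py | zad10
-- ===== SOURCE A (Python) =====
-- def zad10(number):
--     a = 2
--     #a2 = 3 * 2 + 1 => 7
--     # a3 = 3* 5 + 1 => 22
--     # An = 3 ∗ An−1 + 1
--
--     while number+1 > a: # bo wcześniej robie warunek dlatego number+1 bo inaczej nie znajdzie
--         if number == a:
--             return True
--         else:
--             a = 3 * a + 1
--     else:
--         return False
-- ===== SOURCE B (Python) =====
-- def zad10(number):
--     # member iff 2*number + 1 is 5 times a power of 3
--     v = 2 * number + 1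
--     if v % 5:
--         return False
--     q = v // 5
--     while q % 3 == 0:
--         q //= 3
--     return q == 1
-- ===== Notes on version B (the rewrite author's own statement) =====
-- stated objective: alternative
-- what changed: Replaces forward generation of the sequence a_{n+1}=3a_n+1 (scanning until a exceeds number) with a closed-form membership test: check that 2*number+1 is divisible by 5, strip factors of 3 from the quotient, compare with 1.
import Mathlib
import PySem

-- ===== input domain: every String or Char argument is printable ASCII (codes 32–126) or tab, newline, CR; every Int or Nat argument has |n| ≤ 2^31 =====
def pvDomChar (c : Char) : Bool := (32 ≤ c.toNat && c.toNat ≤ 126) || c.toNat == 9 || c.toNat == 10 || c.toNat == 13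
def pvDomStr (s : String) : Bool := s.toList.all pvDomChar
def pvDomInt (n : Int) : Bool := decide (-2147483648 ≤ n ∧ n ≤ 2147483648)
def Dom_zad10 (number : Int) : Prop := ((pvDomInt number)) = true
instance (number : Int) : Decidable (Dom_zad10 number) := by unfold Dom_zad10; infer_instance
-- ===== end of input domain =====

-- B replaces forward generation of the sequence with a closed-form membership test (divisibility by 5, stripping factors of 3).

-- ===== PORT A =====
-- while number+1 > a: if number == a: return True else a = 3*a+1; else: return False
-- (ha : 2 ≤ a is loop-invariant carried only for termination; a starts at 2 and grows)
def zad10Loop (number a : Int) (ha : 2 ≤ a) : Bool :=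
  if number + 1 > a then
    if number == a then true
    else zad10Loop number (3 * a + 1) (by omega)
  else false
termination_by (number + 1 - a).toNat
decreasing_by omega

def zad10 (number : Int) : Bool := zad10Loop number 2 (by omega)

-- ===== PORT B =====
-- while q % 3 == 0: q //= 3   (the q ≠ 0 conjunct only makes the recursion total;
-- B only calls it with odd q, and Python would not terminate on q = 0 either)
def zad10AltLoop (q : Int) : Int :=
  if _h : PySem.Int.mod q 3 = 0 ∧ q ≠ 0 then
    zad10AltLoop (PySem.Int.floordiv q 3)
  else q
termination_by q.natAbs
decreasing_by
  rw [PySem.Int.floordiv_eq_ediv_of_pos (by omega), PySem.Int.mod_eq_emod_of_pos (by omega)] at *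
  omega

def zad10_alt (number : Int) : Bool :=
  let v := 2 * number + 1
  if PySem.Int.mod v 5 ≠ 0 then false
  else decide (zad10AltLoop (PySem.Int.floordiv v 5) = 1)

-- ===== PRECONDITION & SPEC =====
def Spec_zad10 (number : Int) (out : Bool) : Prop := out = zad10_alt number
instance (number : Int) (out : Bool) : Decidable (Spec_zad10 number out) := by unfold Spec_zad10; infer_instance

-- ===== CLAIM (what is proved, stated in full; the proofs are below) =====
def Claim_equal_zad10 : Prop := ∀ (number : Int), Dom_zad10 number → Spec_zad10 number (zad10 number)

-- ===== LEMMAS AND PROOFS =====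

-- A's loop succeeds iff 2*number+1 is (2*a+1) times a power of 3.
theorem zad10Loop_eq_true_iff (number a : Int) (ha : 2 ≤ a) :
    zad10Loop number a ha = true ↔ ∃ k : ℕ, 2 * number + 1 = 3 ^ k * (2 * a + 1) := by
  induction a, ha using zad10Loop.induct number with
  | case1 a ha hgt heq =>
    rw [zad10Loop, if_pos hgt, if_pos heq]
    simp only [true_iff]
    exact ⟨0, by simp at heq; omega⟩
  | case2 a ha hgt hne ih =>
    rw [zad10Loop, if_pos hgt, if_neg hne]
    rw [ih]
    simp only [beq_iff_eq] at hne
    constructor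
    · rintro ⟨k, hk⟩
      exact ⟨k + 1, by rw [hk]; ring⟩
    · rintro ⟨k, hk⟩
      match k with
      | 0 => simp at hk; omega
      | k + 1 => exact ⟨k, by rw [hk]; ring⟩
  | case3 a ha hle =>
    rw [zad10Loop, if_neg hle]
    simp only [Bool.false_eq_true, false_iff, not_exists]
    intro k hk
    have h1 : (1 : Int) ≤ 3 ^ k := one_le_pow₀ (by omega)
    have h2 : 3 ^ k * (2 * a + 1) ≥ 1 * (2 * a + 1) :=
      mul_le_mul_of_nonneg_right h1 (by omega)
    omega

-- B's loop yields 1 iff q is a power of 3.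
theorem zad10AltLoop_eq_one_iff (q : Int) :
    zad10AltLoop q = 1 ↔ ∃ k : ℕ, q = 3 ^ k := by
  induction q using zad10AltLoop.induct with
  | case1 q h ih =>
    obtain ⟨hm, hq⟩ := h
    rw [PySem.Int.mod_eq_emod_of_pos (by omega)] at hm
    have hdvd : (3 : Int) ∣ q := Int.dvd_of_emod_eq_zero hm
    rw [zad10AltLoop, dif_pos ⟨by rw [PySem.Int.mod_eq_emod_of_pos (by omega)]; exact hm, hq⟩]
    rw [PySem.Int.floordiv_eq_ediv_of_pos (by omega)] at ih ⊢
    rw [ih]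
    obtain ⟨m, hm'⟩ := hdvd
    subst hm'
    rw [Int.mul_ediv_cancel_left _ (by omega)]
    constructor
    · rintro ⟨k, rfl⟩; exact ⟨k + 1, by ring⟩
    · rintro ⟨k, hk⟩
      match k with
      | 0 => exfalso; simp at hk; omega
      | k + 1 =>
        refine ⟨k, ?_⟩
        have : (3 : Int) * m = 3 * 3 ^ k := by rw [hk]; ring
        omega
  | case2 q h =>
    rw [zad10AltLoop, dif_neg h]
    rw [PySem.Int.mod_eq_emod_of_pos (by omega)] at h
    constructor
    · rintro rfl; exact ⟨0, rfl⟩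
    · rintro ⟨k, rfl⟩
      match k with
      | 0 => rfl
      | k + 1 =>
        exfalso
        exact h ⟨by rw [pow_succ, Int.mul_emod_left], by positivity⟩

-- membership characterisation of B
theorem zad10_alt_eq_true_iff (number : Int) :
    zad10_alt number = true ↔ ∃ k : ℕ, 2 * number + 1 = 3 ^ k * 5 := by
  unfold zad10_alt
  show (if PySem.Int.mod (2 * number + 1) 5 ≠ 0 then false
      else decide (zad10AltLoop (PySem.Int.floordiv (2 * number + 1) 5) = 1)) = true ↔ _
  rw [PySem.Int.mod_eq_emod_of_pos (by omega), PySem.Int.floordiv_eq_ediv_of_pos (by omega)]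
  by_cases h5 : (2 * number + 1) % 5 = 0
  · rw [if_neg (not_not_intro h5), decide_eq_true_iff, zad10AltLoop_eq_one_iff]
    obtain ⟨m, hm⟩ := Int.dvd_of_emod_eq_zero h5
    rw [hm, Int.mul_ediv_cancel_left _ (by omega)]
    constructor
    · rintro ⟨k, rfl⟩; exact ⟨k, by ring⟩
    · rintro ⟨k, hk⟩; exact ⟨k, by omega⟩
  · rw [if_pos h5]
    simp only [Bool.false_eq_true, false_iff, not_exists]
    intro k hk
    exact h5 (by rw [hk]; exact Int.mul_emod_left _ _)

-- ===== VERDICT (by name: the statement is the Claim_ definition above) =====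
theorem zad10_spec : Claim_equal_zad10 := by
  intro number _
  unfold Spec_zad10
  have h1 : zad10 number = true ↔ ∃ k : ℕ, 2 * number + 1 = 3 ^ k * 5 := by
    unfold zad10
    rw [zad10Loop_eq_true_iff]
    norm_num
  exact Bool.eq_iff_iff.mpr (h1.trans (zad10_alt_eq_true_iff number).symm)
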